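-- pv_equiv track=rewrite | github.com/gabbbarros/AoC | 2021/src/day03.py | Part2
-- ===== SOURCE A (Python) =====
-- def CreateDic(x, size):
--     count = {}
--
--     i = 0
--     while i < size:
--         count[x[i]] = 1
--         i += 1
--     return count
--
-- def Part2(x,y,z):
--     sum = 0
--     count = CreateDic(x,len(x))
--     duplicate1 = {}
--     for i in range(len(y)):
--         if y[i]  in count:
--             duplicate1[y[i]] = 1
--
--     duplicate2 = set()
--     for i in range(len(z)):
--         if z[i]  in duplicate1:
--             duplicate2.add(z[i])
--
--     for a in duplicate2:
--         if (a.islower()):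
--             sum += ord(a) - 96
--         else:
--             sum += ord(a) - 38
--     return sum
-- ===== SOURCE B (Python) =====
-- def Part2(x, y, z):
--     # Count, for every item, in how many of the three sequences it occurs
--     # (each sequence deduplicated first); items with count 3 are the common ones.
--     cnt = {}
--     for group in (x, y, z):
--         for a in dict.fromkeys(group):
--             cnt[a] = cnt.get(a, 0) + 1
--     total = 0
--     for a, k in cnt.items():
--         if k == 3:
--             total += ord(a) - 96 if a.islower() else ord(a) - 38
--     return total
-- ===== Notes on version B (the rewrite author's own statement) =====
-- stated objective: alternative
-- what changed: Replaces A's staged membership filtering (dict of x, filter y against it, filter z against that) with a multiset-counting algorithm: one counter over the deduplicated items of all three sequences, summing priorities of items whose count is 3.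
import Mathlib
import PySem

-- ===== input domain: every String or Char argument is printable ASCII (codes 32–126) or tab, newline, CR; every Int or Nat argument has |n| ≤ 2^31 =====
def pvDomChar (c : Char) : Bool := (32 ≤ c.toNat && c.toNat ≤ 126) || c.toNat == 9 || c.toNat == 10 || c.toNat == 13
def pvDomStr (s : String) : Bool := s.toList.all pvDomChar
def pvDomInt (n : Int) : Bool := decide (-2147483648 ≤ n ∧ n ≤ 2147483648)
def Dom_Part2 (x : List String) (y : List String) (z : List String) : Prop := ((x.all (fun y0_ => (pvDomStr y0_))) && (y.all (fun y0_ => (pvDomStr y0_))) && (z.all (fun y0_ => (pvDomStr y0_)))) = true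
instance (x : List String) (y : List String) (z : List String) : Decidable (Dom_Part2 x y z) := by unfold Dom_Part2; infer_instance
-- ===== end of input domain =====

-- B replaces A's staged membership-filtering passes by a counting algorithm: one counter
-- over the deduplicated items of the three sequences, summing priorities where count = 3
-- (objective: alternative; same asymptotic cost).


-- ===== PORT A =====
-- ord(s): exact for one-character strings; Python raises TypeError otherwise (excluded by Pre_).
def pvOrd (s : String) : Int :=
  match s.toList with
  | [c] => (c.toNat : Int)
  | _ => 0

-- s.islower(): some cased char and no uppercase char — exact on the ASCII domain.
def pvIslower (s : String) : Bool :=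
  s.toList.any PySem.Chars.islower && s.toList.all (fun c => !PySem.Chars.isupper c)

-- the priority used by both programs (ord(a)-96 for lowercase, else ord(a)-38)
def pvPrio (s : String) : Int :=
  if pvIslower s then pvOrd s - 96 else pvOrd s - 38

-- CreateDic(x, size): while i < size: count[x[i]] = 1
def CreateDic (x : List String) (size : Int) : PySem.Dict String Int :=
  (PySem.List.pyRange 0 size).foldl
    (fun d i => d.insert (PySem.List.pyGetD x i "") 1) PySem.Dict.empty

def Part2 (x : List String) (y : List String) (z : List String) : Int :=
  let count := CreateDic x (x.length : Int)
  let duplicate1 :=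
    (PySem.List.pyRange 0 (y.length : Int)).foldl
      (fun d i =>
        if count.contains (PySem.List.pyGetD y i "") then
          d.insert (PySem.List.pyGetD y i "") (1 : Int)
        else d)
      PySem.Dict.empty
  let duplicate2 : PySem.Set String :=
    (PySem.List.pyRange 0 (z.length : Int)).foldl
      (fun s i =>
        if duplicate1.contains (PySem.List.pyGetD z i "") then
          PySem.Set.add s (PySem.List.pyGetD z i "")
        else s)
      PySem.Set.empty
  duplicate2.foldl (fun acc a => acc + pvPrio a) 0

-- ===== PORT B =====
-- cnt[a] = cnt.get(a, 0) + 1 over dict.fromkeys(group) for each of the three groups,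
-- then sum priorities of the items whose count is 3.
def Part2_alt (x : List String) (y : List String) (z : List String) : Int :=
  let cnt : PySem.Dict String Int :=
    [x, y, z].foldl
      (fun d g =>
        (PySem.List.dedup g).foldl (fun d a => d.insert a (d.getD a 0 + 1)) d)
      PySem.Dict.empty
  cnt.items.foldl (fun total p => if p.2 == (3 : Int) then total + pvPrio p.1 else total) 0

-- ===== PRECONDITION & SPEC =====
-- Pre_ excludes exactly the inputs on which Python A raises TypeError: a string common to
-- x, y and z whose length is not 1 reaches ord(), which demands a single character.
def Pre_Part2 (x : List String) (y : List String) (z : List String) : Prop :=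
  ∀ s ∈ x, s ∈ y → s ∈ z → s.toList.length = 1
instance (x : List String) (y : List String) (z : List String) : Decidable (Pre_Part2 x y z) := by
  unfold Pre_Part2; infer_instance

def pvWitness_Part2 : List String × List String × List String :=
  (["a", "bb", "Z"], ["a", "Z", "q"], ["Z", "a"])

def Spec_Part2 (x : List String) (y : List String) (z : List String) (out : Int) : Prop := out = Part2_alt x y z
instance (x : List String) (y : List String) (z : List String) (out : Int) : Decidable (Spec_Part2 x y z out) := by unfold Spec_Part2; infer_instance

-- ===== CLAIM (what is proved, stated in full; the proofs are below) =====
def Claim_equal_Part2 : Prop := ∀ (x : List String) (y : List String) (z : List String), Dom_Part2 x y z → Pre_Part2 x y z → Spec_Part2 x y z (Part2 x y z)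

-- ===== LEMMAS AND PROOFS =====

-- index loop 'for i in range(len(l)): … l[i] …' as a fold over l itself
lemma idxloop {β : Type} (l : List String) (f : β → String → β) (init : β) :
    (PySem.List.pyRange 0 (l.length : Int)).foldl
      (fun acc i => f acc (PySem.List.pyGetD l i "")) init = l.foldl f init := by
  rw [PySem.List.foldl_pyRange_pyGetD' l "" f init le_rfl]
  simp

-- the count dict built from x holds exactly the elements of x
lemma contains_count_fold (x : List String) (k : String) :
    (x.foldl (fun d s => d.insert s (1 : Int)) PySem.Dict.empty).contains k = true ↔ k ∈ x := by
  rw [PySem.Dict.contains_iff_mem_keys,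
    PySem.Dict.keys_foldl_insert x (fun _ _ => (1 : Int)) PySem.Dict.empty]
  simp [PySem.Set.mem_update, PySem.Dict.empty]

-- conditional-insert fold: membership in the resulting dict
lemma contains_filter_fold (l : List String) (p : String → Bool)
    (d : PySem.Dict String Int) (k : String) :
    (l.foldl (fun d s => if p s then d.insert s (1 : Int) else d) d).contains k = true ↔
      d.contains k = true ∨ (k ∈ l ∧ p k = true) := by
  induction l generalizing d with
  | nil => simp
  | cons a l ih =>
    simp only [List.foldl_cons]
    by_cases hp : p a
    · simp only [hp, if_pos, ih, PySem.Dict.contains_insert]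
      by_cases hk : k = a
      · subst hk; simp [hp]
      · have hba : (k == a) = false := by simp [hk]
        simp only [hba, Bool.false_or, List.mem_cons]
        tauto
    · rw [if_neg (by simp [hp])]
      rw [ih]
      simp only [List.mem_cons]
      constructor
      · rintro (h | ⟨hm, hpk⟩)
        · exact Or.inl h
        · exact Or.inr ⟨Or.inr hm, hpk⟩
      · rintro (h | ⟨hm | hm, hpk⟩)
        · exact Or.inl h
        · subst hm; exact absurd hpk (by simp [hp])
        · exact Or.inr ⟨hm, hpk⟩

-- conditional Set.add fold: nodup and membership
lemma nodup_add_fold (l : List String) (p : String → Bool) (s : PySem.Set String)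
    (hs : s.Nodup) :
    (l.foldl (fun s a => if p a then PySem.Set.add s a else s) s).Nodup := by
  induction l generalizing s with
  | nil => simpa
  | cons a l ih =>
    simp only [List.foldl_cons]
    by_cases hp : p a
    · rw [if_pos hp]; exact ih _ (PySem.Set.nodup_add s a hs)
    · rw [if_neg (by simp [hp])]; exact ih _ hs

lemma mem_add_fold (l : List String) (p : String → Bool) (s : PySem.Set String) (k : String) :
    k ∈ l.foldl (fun s a => if p a then PySem.Set.add s a else s) s ↔
      k ∈ s ∨ (k ∈ l ∧ p k = true) := by
  induction l generalizing s with
  | nil => simp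
  | cons a l ih =>
    simp only [List.foldl_cons]
    by_cases hp : p a
    · rw [if_pos hp, ih]
      simp only [PySem.Set.mem_add, List.mem_cons]
      by_cases hk : k = a
      · subst hk; simp [hp]
      · tauto
    · rw [if_neg (by simp [hp]), ih]
      simp only [List.mem_cons]
      constructor
      · rintro (h | ⟨hm, hpk⟩)
        · exact Or.inl h
        · exact Or.inr ⟨Or.inr hm, hpk⟩
      · rintro (h | ⟨hm | hm, hpk⟩)
        · exact Or.inl h
        · subst hm; exact absurd hpk (by simp [hp])
        · exact Or.inr ⟨hm, hpk⟩

-- B's counter: value at any key is the number of the three deduplicated lists containing it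
lemma getD_cnt (x y z : List String) (k : String) :
    (([x, y, z].foldl
        (fun d g => (PySem.List.dedup g).foldl (fun d a => d.insert a (d.getD a 0 + 1)) d)
        (PySem.Dict.empty : PySem.Dict String Int)).getD k 0) =
      ((PySem.List.dedup x).count k : Int) + ((PySem.List.dedup y).count k : Int) +
        ((PySem.List.dedup z).count k : Int) := by
  simp only [List.foldl_cons, List.foldl_nil]
  rw [PySem.Dict.getD_foldl_insert_add_one, PySem.Dict.getD_foldl_insert_add_one,
    PySem.Dict.getD_foldl_insert_add_one]
  simp [PySem.Dict.getD_empty]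

lemma count_dedup_eq_ite (l : List String) (k : String) :
    ((PySem.List.dedup l).count k : Int) = if k ∈ l then 1 else 0 := by
  by_cases h : k ∈ l
  · rw [if_pos h,
      List.count_eq_one_of_mem (PySem.List.nodup_dedup l) ((PySem.List.mem_dedup l k).2 h)]
    norm_num
  · rw [if_neg h,
      List.count_eq_zero_of_not_mem (fun hm => h ((PySem.List.mem_dedup l k).1 hm))]
    norm_num

lemma keys_cnt_nodup (x y z : List String) :
    (([x, y, z].foldl
        (fun d g => (PySem.List.dedup g).foldl (fun d a => d.insert a (d.getD a 0 + 1)) d)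
        (PySem.Dict.empty : PySem.Dict String Int)).keys).Nodup := by
  simp only [List.foldl_cons, List.foldl_nil]
  apply PySem.Dict.nodup_keys_foldl_insert
  apply PySem.Dict.nodup_keys_foldl_insert
  apply PySem.Dict.nodup_keys_foldl_insert
  exact PySem.Dict.nodup_keys_empty

-- filtered item sum of a nodup-keys dict as a filtered key sum
lemma map_filter_items (d : PySem.Dict String Int) (hnd : d.keys.Nodup) :
    (d.items.filter (fun q => q.2 == (3 : Int))).map (fun q => pvPrio q.1) =
      (d.keys.filter (fun k => d.getD k 0 == (3 : Int))).map pvPrio := by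
  rw [PySem.Dict.items_eq_map_keys d hnd 0, List.filter_map, List.map_map]
  rfl

-- B's counter holds exactly the items occurring in at least one of the three sequences
lemma mem_keys_cnt (x y z : List String) (k : String) :
    k ∈ ([x, y, z].foldl
        (fun d g => (PySem.List.dedup g).foldl (fun d a => d.insert a (d.getD a 0 + 1)) d)
        (PySem.Dict.empty : PySem.Dict String Int)).keys ↔ k ∈ x ∨ k ∈ y ∨ k ∈ z := by
  simp only [List.foldl_cons, List.foldl_nil]
  rw [PySem.Dict.keys_foldl_insert, PySem.Dict.keys_foldl_insert,
    PySem.Dict.keys_foldl_insert]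
  simp [PySem.Set.mem_update, PySem.Dict.keys_empty, or_assoc]

-- ===== VERDICT (by name: the statement is the Claim_ definition above) =====
theorem Part2_spec : Claim_equal_Part2 := by
  intro x y z _ _
  unfold Spec_Part2 Part2 Part2_alt CreateDic
  simp only []
  rw [idxloop x (fun d s => d.insert s (1 : Int)) PySem.Dict.empty]
  rw [idxloop y
    (fun d s =>
      if (x.foldl (fun d s => d.insert s (1 : Int)) PySem.Dict.empty).contains s then
        d.insert s (1 : Int)
      else d)
    PySem.Dict.empty]
  rw [idxloop z
    (fun s a =>
      if (y.foldl
          (fun d s =>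
            if (x.foldl (fun d s => d.insert s (1 : Int)) PySem.Dict.empty).contains s then
              d.insert s (1 : Int)
            else d)
          PySem.Dict.empty).contains a then
        PySem.Set.add s a
      else s)
    PySem.Set.empty]
  rw [PySem.List.foldl_add, zero_add]
  rw [PySem.List.foldl_if_eq_foldl_filter (p := fun q : String × Int => q.2 == (3 : Int))
    (f := fun total q => total + pvPrio q.1)]
  rw [PySem.List.foldl_add, zero_add]
  rw [map_filter_items _ (keys_cnt_nodup x y z)]
  apply List.Perm.sum_eq
  apply List.Perm.map
  refine (List.perm_ext_iff_of_nodup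
    (nodup_add_fold _ _ _ List.nodup_nil)
    (List.Nodup.filter _ (keys_cnt_nodup x y z))).2 ?_
  intro a
  rw [mem_add_fold, List.mem_filter, mem_keys_cnt]
  rw [contains_filter_fold, contains_count_fold]
  rw [getD_cnt, count_dedup_eq_ite, count_dedup_eq_ite, count_dedup_eq_ite]
  have hemp : (PySem.Dict.empty : PySem.Dict String Int).contains a = false := rfl
  simp only [hemp, List.not_mem_nil, false_or, Bool.false_eq_true, beq_iff_eq]
  by_cases hx : a ∈ x <;> by_cases hy : a ∈ y <;> by_cases hz : a ∈ z <;>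
    simp [hx, hy, hz]
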